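-- pv_equiv track=rewrite | github.com/rafi79/Job_Search | job_search_agent.py | determine_education_level
-- ===== SOURCE A (Python) =====
-- from typing import Dict, List, Any
--
-- def determine_education_level(education_list: List[Dict]) -> int:
--     """Determine highest education level (1=Bachelor, 2=Master, 3=PhD)"""
--     max_level = 0
--
--     for edu in education_list:
--         degree = edu.get('degree', '').lower()
--
--         if any(keyword in degree for keyword in ['phd', 'ph.d', 'doctorate', 'doctor']):
--             max_level = max(max_level, 3)
--         elif any(keyword in degree for keyword in ['master', 'msc', 'ms', 'ma', 'm.sc', 'm.a']):
--             max_level = max(max_level, 2)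
--         elif any(keyword in degree for keyword in ['bachelor', 'bsc', 'bs', 'ba', 'b.sc', 'b.a']):
--             max_level = max(max_level, 1)
--
--     return max_level
-- ===== SOURCE B (Python) =====
-- def determine_education_level(education_list):
--     """Determine highest education level (1=Bachelor, 2=Master, 3=PhD)"""
--     def degrees():
--         return (edu.get('degree', '').lower() for edu in education_list)
--     if any(any(k in d for k in ['phd', 'ph.d', 'doctorate', 'doctor']) for d in degrees()):
--         return 3
--     if any(any(k in d for k in ['master', 'msc', 'ms', 'ma', 'm.sc', 'm.a']) for d in degrees()):
--         return 2
--     if any(any(k in d for k in ['bachelor', 'bsc', 'bs', 'ba', 'b.sc', 'b.a']) for d in degrees()):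
--         return 1
--     return 0
-- ===== Notes on version B (the rewrite author's own statement) =====
-- stated objective: alternative
-- what changed: Inverted loop nesting: instead of one item-major pass keeping a running max level per entry, B scans the list tier-by-tier from PhD down and returns at the first tier any degree matches.
import Mathlib
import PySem

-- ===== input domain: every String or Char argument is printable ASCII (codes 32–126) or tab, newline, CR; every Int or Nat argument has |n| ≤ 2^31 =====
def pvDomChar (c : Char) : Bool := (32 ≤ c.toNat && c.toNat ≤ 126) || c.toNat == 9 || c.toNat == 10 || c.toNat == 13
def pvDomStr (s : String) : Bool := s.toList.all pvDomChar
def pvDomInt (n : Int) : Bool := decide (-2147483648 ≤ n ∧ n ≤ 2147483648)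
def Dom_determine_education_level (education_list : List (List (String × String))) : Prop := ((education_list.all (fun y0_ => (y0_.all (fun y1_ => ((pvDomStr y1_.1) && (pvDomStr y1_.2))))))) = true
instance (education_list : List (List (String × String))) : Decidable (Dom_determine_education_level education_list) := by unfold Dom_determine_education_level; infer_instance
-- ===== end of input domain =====

-- B inverts the loop nesting: tier-major scans (PhD, then Master, then Bachelor) instead of A's
-- item-major single pass with a running max. Same keyword groups and priority; exact equivalence proved.

-- ===== PORT A =====
-- literal transliteration: loop over education_list keeping max_level, per item a branch cascade
def determine_education_level (education_list : List (List (String × String))) : Int :=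
  education_list.foldl (fun max_level edu =>
    let degree := PySem.Str.lower ((PySem.Dict.mk edu).getD "degree" "")
    if ["phd", "ph.d", "doctorate", "doctor"].any (fun keyword => PySem.Str.isIn keyword degree) then
      max max_level 3
    else if ["master", "msc", "ms", "ma", "m.sc", "m.a"].any (fun keyword => PySem.Str.isIn keyword degree) then
      max max_level 2
    else if ["bachelor", "bsc", "bs", "ba", "b.sc", "b.a"].any (fun keyword => PySem.Str.isIn keyword degree) then
      max max_level 1
    else max_level) 0

-- ===== PORT B =====
-- B-side helper: the lowered degree string of one entry
def pvDegree (edu : List (String × String)) : String :=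
  PySem.Str.lower ((PySem.Dict.mk edu).getD "degree" "")

def determine_education_level_alt (education_list : List (List (String × String))) : Int :=
  if education_list.any (fun edu => ["phd", "ph.d", "doctorate", "doctor"].any
      (fun k => PySem.Str.isIn k (pvDegree edu))) then 3
  else if education_list.any (fun edu => ["master", "msc", "ms", "ma", "m.sc", "m.a"].any
      (fun k => PySem.Str.isIn k (pvDegree edu))) then 2
  else if education_list.any (fun edu => ["bachelor", "bsc", "bs", "ba", "b.sc", "b.a"].any
      (fun k => PySem.Str.isIn k (pvDegree edu))) then 1
  else 0

-- ===== PRECONDITION & SPEC =====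
def Spec_determine_education_level (education_list : List (List (String × String))) (out : Int) : Prop := out = determine_education_level_alt education_list
instance (education_list : List (List (String × String))) (out : Int) : Decidable (Spec_determine_education_level education_list out) := by unfold Spec_determine_education_level; infer_instance

-- ===== CLAIM (what is proved, stated in full; the proofs are below) =====
def Claim_equal_determine_education_level : Prop := ∀ (education_list : List (List (String × String))), Dom_determine_education_level education_list → Spec_determine_education_level education_list (determine_education_level education_list)

-- ===== LEMMAS AND PROOFS =====

-- proof-only helpers: the per-entry keyword test and the level one entry contributes
def pvHit (ks : List String) (edu : List (String × String)) : Bool :=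
  ks.any (fun k => PySem.Str.isIn k (pvDegree edu))

def pvLvl (edu : List (String × String)) : Int :=
  if pvHit ["phd", "ph.d", "doctorate", "doctor"] edu then 3
  else if pvHit ["master", "msc", "ms", "ma", "m.sc", "m.a"] edu then 2
  else if pvHit ["bachelor", "bsc", "bs", "ba", "b.sc", "b.a"] edu then 1
  else 0

-- A's loop body is `max` of the (nonnegative) accumulator with the entry's level
theorem pv_body_eq (m : Int) (hm : 0 ≤ m) (edu : List (String × String)) :
    (let degree := PySem.Str.lower ((PySem.Dict.mk edu).getD "degree" "")
     if ["phd", "ph.d", "doctorate", "doctor"].any (fun keyword => PySem.Str.isIn keyword degree) then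
       max m 3
     else if ["master", "msc", "ms", "ma", "m.sc", "m.a"].any (fun keyword => PySem.Str.isIn keyword degree) then
       max m 2
     else if ["bachelor", "bsc", "bs", "ba", "b.sc", "b.a"].any (fun keyword => PySem.Str.isIn keyword degree) then
       max m 1
     else m) = max m (pvLvl edu) := by
  simp only [pvLvl, pvHit, pvDegree]
  split_ifs <;> omega

-- B's port restated through pvHit (definitional)
def pvAltH (l : List (List (String × String))) : Int :=
  if l.any (pvHit ["phd", "ph.d", "doctorate", "doctor"]) then 3
  else if l.any (pvHit ["master", "msc", "ms", "ma", "m.sc", "m.a"]) then 2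
  else if l.any (pvHit ["bachelor", "bsc", "bs", "ba", "b.sc", "b.a"]) then 1
  else 0

theorem pv_alt_eq_H (l : List (List (String × String))) :
    determine_education_level_alt l = pvAltH l := rfl

-- B's answer on a cons is `max` of the head's level and B's answer on the tail
theorem pv_alt_cons (e : List (String × String)) (t : List (List (String × String))) :
    determine_education_level_alt (e :: t) = max (pvLvl e) (determine_education_level_alt t) := by
  rw [pv_alt_eq_H, pv_alt_eq_H]
  simp only [pvAltH, pvLvl, List.any_cons, Bool.or_eq_true]
  cases h1 : pvHit ["phd", "ph.d", "doctorate", "doctor"] e <;>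
  cases h2 : pvHit ["master", "msc", "ms", "ma", "m.sc", "m.a"] e <;>
  cases h3 : pvHit ["bachelor", "bsc", "bs", "ba", "b.sc", "b.a"] e <;>
  simp only [Bool.false_eq_true, false_or, true_or, if_true, if_false] <;>
  split_ifs <;> omega

theorem pv_fold_eq (l : List (List (String × String))) : ∀ (m : Int), 0 ≤ m →
    l.foldl (fun max_level edu =>
      let degree := PySem.Str.lower ((PySem.Dict.mk edu).getD "degree" "")
      if ["phd", "ph.d", "doctorate", "doctor"].any (fun keyword => PySem.Str.isIn keyword degree) then
        max max_level 3
      else if ["master", "msc", "ms", "ma", "m.sc", "m.a"].any (fun keyword => PySem.Str.isIn keyword degree) then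
        max max_level 2
      else if ["bachelor", "bsc", "bs", "ba", "b.sc", "b.a"].any (fun keyword => PySem.Str.isIn keyword degree) then
        max max_level 1
      else max_level) m = max m (determine_education_level_alt l) := by
  induction l with
  | nil => intro m hm; simp [determine_education_level_alt]; omega
  | cons e t ih =>
    intro m hm
    rw [List.foldl_cons, pv_body_eq m hm e, ih _ (le_trans hm (le_max_left _ _)), pv_alt_cons]
    omega

theorem pv_alt_nonneg (l : List (List (String × String))) : 0 ≤ determine_education_level_alt l := by
  unfold determine_education_level_alt; split_ifs <;> omega

-- ===== VERDICT (by name: the statement is the Claim_ definition above) =====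
theorem determine_education_level_spec : Claim_equal_determine_education_level := by
  intro l _
  unfold Spec_determine_education_level determine_education_level
  rw [pv_fold_eq l 0 le_rfl]
  have := pv_alt_nonneg l
  omega
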